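-- pv_equiv track=rewrite | github.com/VarshaUshaSunilBabu/GOMOKU | Final working code of Gomoku.py | create_coordinate_map
-- ===== SOURCE A (Python) =====
-- def create_coordinate_map(board_size):
--     """Create a map from a single integer to (row, col) coordinates."""
--     coordinate_map = {}
--     count = 1
--     for row in range(board_size):
--         for col in range(board_size):
--             coordinate_map[count] = (row, col)
--             count += 1
--     return coordinate_map
-- ===== SOURCE B (Python) =====
-- def create_coordinate_map(board_size):
--     """Create a map from a single integer to (row, col) coordinates."""
--     return {i + 1: divmod(i, board_size) for i in range(board_size * board_size)}
-- ===== Notes on version B (the rewrite author's own statement) =====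
-- stated objective: simpler
-- what changed: Replaces the nested row/col loops with a manually incremented counter by one flat dict comprehension over range(board_size*board_size) whose key is the flat index plus one and whose value is divmod of the index by the board size; Pre_ restricts to nonnegative board sizes, the natural domain (A returns {} on negative sizes only because its ranges are empty).
-- outside the precondition, e.g. on create_coordinate_map(-2): A returns {}, B returns {1: (0, 0), 2: (-1, -1), 3: (-1, 0), 4: (-2, -1)}
import Mathlib
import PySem

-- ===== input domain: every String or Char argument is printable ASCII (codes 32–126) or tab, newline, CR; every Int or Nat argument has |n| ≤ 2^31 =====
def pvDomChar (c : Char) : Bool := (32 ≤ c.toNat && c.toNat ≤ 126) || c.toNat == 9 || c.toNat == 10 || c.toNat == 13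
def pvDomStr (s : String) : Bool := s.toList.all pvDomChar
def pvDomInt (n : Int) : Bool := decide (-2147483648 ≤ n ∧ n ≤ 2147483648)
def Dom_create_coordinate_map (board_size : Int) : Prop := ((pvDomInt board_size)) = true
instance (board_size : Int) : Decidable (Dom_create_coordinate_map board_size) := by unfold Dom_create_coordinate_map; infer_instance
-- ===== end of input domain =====

-- B replaces A's nested loops with a manually incremented counter by one flat
-- pass whose key is one above the flat index and whose value is divmod of that
-- index by the board size; same result on nonnegative board sizes, simpler decomposition.

-- ===== PORT A =====
def create_coordinate_map (board_size : Int) : List (Int × Int × Int) :=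
  let res :=
    (PySem.List.pyRange 0 board_size 1).foldl
      (fun st row =>
        (PySem.List.pyRange 0 board_size 1).foldl
          (fun st2 col => (st2.1.insert st2.2 (row, col), st2.2 + 1)) st)
      ((PySem.Dict.empty : PySem.Dict Int (Int × Int)), (1 : Int))
  res.1.items

-- ===== PORT B =====
-- divmod(i, board_size) is ported as (floordiv i board_size, mod i board_size); exact,
-- since the comprehension only evaluates it when board_size ≠ 0.
def create_coordinate_map_alt (board_size : Int) : List (Int × Int × Int) :=
  ((PySem.List.pyRange 0 (board_size * board_size) 1).foldl
      (fun d i => d.insert (i + 1) (PySem.Int.floordiv i board_size, PySem.Int.mod i board_size))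
      (PySem.Dict.empty : PySem.Dict Int (Int × Int))).items

-- ===== PRECONDITION & SPEC =====
-- Pre_ excludes negative board sizes, which are outside the natural domain of a board
-- dimension: A returns {} there only because its ranges are empty, while B's flat
-- range(board_size*board_size) is nonempty for negative sizes.
def Pre_create_coordinate_map (board_size : Int) : Prop := 0 ≤ board_size
instance (board_size : Int) : Decidable (Pre_create_coordinate_map board_size) := by unfold Pre_create_coordinate_map; infer_instance
def pvWitness_create_coordinate_map : Int := 3
def Spec_create_coordinate_map (board_size : Int) (out : List (Int × Int × Int)) : Prop := out = create_coordinate_map_alt board_size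
instance (board_size : Int) (out : List (Int × Int × Int)) : Decidable (Spec_create_coordinate_map board_size out) := by unfold Spec_create_coordinate_map; infer_instance

-- ===== CLAIM (what is proved, stated in full; the proofs are below) =====
def Claim_equal_create_coordinate_map : Prop := ∀ (board_size : Int), Dom_create_coordinate_map board_size → Pre_create_coordinate_map board_size → Spec_create_coordinate_map board_size (create_coordinate_map board_size)

-- ===== LEMMAS AND PROOFS =====

/-- The item the final dict holds at 0-based position `t`, for board side `m`. -/
def itemOf (m t : Nat) : Int × Int × Int := ((t : Int) + 1, (((t / m : Nat) : Int), ((t % m : Nat) : Int)))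

/-- A's inner column loop appends `m` fresh items and advances the counter by `m`. -/
lemma innerA (row : Int) (m : Nat) (d : PySem.Dict Int (Int × Int)) (c : Int)
    (hk : ∀ k ∈ d.keys, k < c) :
    (List.range m).foldl
      (fun st (k : Nat) => (st.1.insert st.2 (row, (k : Int)), st.2 + 1)) (d, c)
    = (PySem.Dict.mk (d.items ++ (List.range m).map (fun (j : Nat) => ((c + (j : Int), (row, (j : Int))) : Int × Int × Int))),
       c + (m : Int)) := by
  induction m with
  | zero => cases d; simp
  | succ q ih =>
    rw [List.range_succ, List.foldl_append, ih]
    simp only [List.foldl_cons, List.foldl_nil]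
    have hc : (PySem.Dict.mk (d.items ++ (List.range q).map
        (fun (j : Nat) => ((c + (j : Int), (row, (j : Int))) : Int × Int × Int)))).contains (c + (q : Int)) = false := by
      rw [PySem.Dict.contains_eq_decide_mem_keys]
      simp only [PySem.Dict.keys_mk, List.map_append, List.map_map, decide_eq_false_iff_not,
        List.mem_append]
      rintro (h | h)
      · obtain ⟨p, hp, hpe⟩ := List.mem_map.mp h
        have hlt : p.1 < c := hk p.1 (List.mem_map.mpr ⟨p, hp, rfl⟩)
        omega
      · obtain ⟨j, hj, hje⟩ := List.mem_map.mp h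
        have hjq : j < q := List.mem_range.mp hj
        have : c + (j : Int) = c + (q : Int) := hje
        omega
    refine Prod.ext ?_ ?_
    · apply PySem.Dict.ext
      rw [PySem.Dict.items_insert_of_not_contains _ _ hc]
      simp only [List.map_append, List.map_cons, List.map_nil, List.append_assoc]
    · push_cast
      ring

/-- A's whole nested loop, after `r` rows, holds exactly the first `r*m` items. -/
lemma outerA (m : Nat) (r : Nat) :
    (List.range r).foldl
      (fun st (i : Nat) =>
        (List.range m).foldl
          (fun st2 (k : Nat) => (st2.1.insert st2.2 ((i : Int), (k : Int)), st2.2 + 1)) st)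
      ((PySem.Dict.empty : PySem.Dict Int (Int × Int)), (1 : Int))
    = (PySem.Dict.mk ((List.range (r * m)).map (itemOf m)), 1 + ((r * m : Nat) : Int)) := by
  induction r with
  | zero => simp [PySem.Dict.empty]
  | succ p ih =>
    rw [List.range_succ, List.foldl_append, ih]
    simp only [List.foldl_cons, List.foldl_nil]
    rw [innerA]
    · refine Prod.ext ?_ ?_
      · apply PySem.Dict.ext
        simp only
        have hsm : (p + 1) * m = p * m + m := by ring
        rw [hsm, List.range_add, List.map_append, List.map_map]
        congr 1
        apply List.map_congr_left
        intro j hj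
        have hjm : j < m := List.mem_range.mp hj
        have hm : 0 < m := Nat.lt_of_le_of_lt (Nat.zero_le j) hjm
        have hd : (p * m + j) / m = p := by
          rw [Nat.add_comm, Nat.add_mul_div_right j p hm, Nat.div_eq_of_lt hjm]
          omega
        have hmod : (p * m + j) % m = j := by
          rw [Nat.add_comm, Nat.add_mul_mod_self_right, Nat.mod_eq_of_lt hjm]
        simp only [Function.comp, itemOf, hd, hmod]
        refine Prod.ext ?_ rfl
        simp only
        push_cast
        ring
      · simp only
        push_cast
        ring
    · intro k hkk
      simp only [PySem.Dict.keys_mk, List.mem_map] at hkk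
      obtain ⟨pr, hab, hke⟩ := hkk
      obtain ⟨t, ht, hte⟩ := hab
      have ht' : t < p * m := List.mem_range.mp ht
      have hfst : pr.1 = (t : Int) + 1 := by
        have := congrArg Prod.fst hte
        simp only [itemOf] at this
        exact this.symm
      rw [← hke, hfst]
      push_cast
      omega

/-- A's result in closed form. -/
lemma a_items (n : Int) :
    create_coordinate_map n = (List.range (n.toNat * n.toNat)).map (itemOf n.toNat) := by
  unfold create_coordinate_map
  simp only [PySem.List.pyRange_one, sub_zero, zero_add, List.foldl_map]
  rw [outerA]

/-- B's result in closed form, for nonnegative `n`. -/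
lemma b_items (n : Int) (hn : 0 ≤ n) :
    create_coordinate_map_alt n = (List.range (n.toNat * n.toNat)).map (itemOf n.toNat) := by
  unfold create_coordinate_map_alt
  have hs : n = (n.toNat : Int) := by omega
  rw [hs]
  have hss : ((n.toNat : Int) * (n.toNat : Int) - 0).toNat = n.toNat * n.toNat := by
    omega
  simp only [PySem.List.pyRange_one, hss, zero_add, List.foldl_map]
  rw [PySem.Dict.items_foldl_insert_fresh]
  · rw [show (PySem.Dict.empty : PySem.Dict Int (Int × Int)).items = [] from rfl,
      List.nil_append]
    apply List.map_congr_left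
    intro t _
    simp only [itemOf, PySem.Int.floordiv_natCast, PySem.Int.mod_natCast, Int.toNat_natCast]
  · intro a _
    rfl
  · refine List.Nodup.map ?_ List.nodup_range
    intro a b h
    have : (a : Int) + 1 = (b : Int) + 1 := h
    omega

-- ===== VERDICT (by name: the statement is the Claim_ definition above) =====
theorem create_coordinate_map_spec : Claim_equal_create_coordinate_map := by
  intro n _ hpre
  unfold Spec_create_coordinate_map
  rw [a_items, b_items n hpre]
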